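-- pv_equiv track=rewrite | github.com/pypi-data/pypi-mirror-362 | packages/alignment-tools/alignment_tools-0.1.3.tar.gz/alignment_tools-0.1.3/alignment_tools/digest.py | semi_specific_digest
-- ===== SOURCE A (Python) =====
-- from typing import Dict, Iterator, List, Optional
-- from typing import List
--
-- def semi_specific_digest(
--     seq: str,
--     min_len: int,
--     max_len: int,
--     pre: List[str],
--     not_post: List[str],
--     post: List[str],
--     miscleavages: int,
--     methionine_cleavage: bool,
-- ):
--     seq_len, starts = len(seq), [0]
--     methionine_cleavage = methionine_cleavage and seq[0] == "M"
--     length_accepted = lambda x: x >= min_len and x <= max_len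
--
--     for i in range(seq_len + 1):
--         is_cleavage_site = is_enzymatic(
--             seq[min([seq_len - 1, i])],
--             seq[min([seq_len - 1, i + 1])],
--             pre,
--             not_post,
--             post,
--         )
--         is_methionine_cleavage_site = i == 0 and methionine_cleavage
--         if i == seq_len or is_cleavage_site or is_methionine_cleavage_site:
--             # peptides with enzymatic C-terminal (both enzymatic and non-enzymatic N-terminal)
--             start = starts[0]
--             for j in range(start, min([i + 1, seq_len])):
--                 pep_len = min([i, seq_len - 1]) - j + 1
--                 if length_accepted(pep_len):
--                     yield (seq[j : i + 1])
--             starts.append(i + 1)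
--             methionine_cleaved = int(starts[0] == 0 and methionine_cleavage)
--             if len(starts) > miscleavages + 1 + methionine_cleaved or i == seq_len:
--                 starts = starts[1 + methionine_cleaved :]
--         else:  # peptides with non enzymatic C-terminal
--             for start in starts:
--                 pep_len = i - start + 1
--                 if length_accepted(pep_len) and i + 1 not in starts:
--                     yield (seq[start : i + 1])
--
-- def is_enzymatic(aa1, aa2, pre, not_post, post):
--     return (aa1 in pre and aa2 not in not_post) or (aa2 in post)
-- ===== SOURCE B (Python) =====
-- def is_enzymatic(aa1, aa2, pre, not_post, post):
--     return (aa1 in pre and aa2 not in not_post) or (aa2 in post)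
--
-- def semi_specific_digest(
--     seq,
--     min_len,
--     max_len,
--     pre,
--     not_post,
--     post,
--     miscleavages,
--     methionine_cleavage,
-- ):
--     L = len(seq)
--     met = methionine_cleavage and seq[0] == "M"
--     # stage 1: every cleavage position, computed up front (L itself always is one)
--     sites = [i for i in range(L + 1)
--              if i == L
--              or is_enzymatic(seq[min(L - 1, i)], seq[min(L - 1, i + 1)], pre, not_post, post)
--              or (i == 0 and met)]
--     bounds = [0] + [s + 1 for s in sites]  # every candidate N-terminus, in order
--     # stage 2: walk the site list; a = index into bounds of the earliest live N-terminus
--     a, prev = 0, 0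
--     for t, s in enumerate(sites):
--         # non-enzymatic C-termini strictly between the previous site and this one
--         for i in range(prev, s):
--             for b in bounds[a:t + 1]:
--                 if min_len <= i - b + 1 <= max_len:
--                     yield seq[b:i + 1]
--         # enzymatic C-terminus at s: the accepted N-termini form a closed-form window
--         e = min(s, L - 1)
--         for j in range(max(bounds[a], e - max_len + 1), min(min(s + 1, L), e - min_len + 2)):
--             yield seq[j:s + 1]
--         drop = 2 if (a == 0 and met) else 1
--         if (t + 1 - a) + 1 > miscleavages + drop or s == L:
--             a += drop
--         prev = s + 1
-- ===== Notes on version B (the rewrite author's own statement) =====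
-- stated objective: faster
-- what changed: B replaces A's single position-by-position pass with a mutable sliding starts list by two staged passes: it first materialises the complete list of cleavage sites and the array of candidate N-termini, then iterates over the site list only, tracking just an integer index into that array, emitting non-enzymatic peptides per inter-site segment and enumerating the accepted N-termini at each site as a closed-form index window.
import Mathlib
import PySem

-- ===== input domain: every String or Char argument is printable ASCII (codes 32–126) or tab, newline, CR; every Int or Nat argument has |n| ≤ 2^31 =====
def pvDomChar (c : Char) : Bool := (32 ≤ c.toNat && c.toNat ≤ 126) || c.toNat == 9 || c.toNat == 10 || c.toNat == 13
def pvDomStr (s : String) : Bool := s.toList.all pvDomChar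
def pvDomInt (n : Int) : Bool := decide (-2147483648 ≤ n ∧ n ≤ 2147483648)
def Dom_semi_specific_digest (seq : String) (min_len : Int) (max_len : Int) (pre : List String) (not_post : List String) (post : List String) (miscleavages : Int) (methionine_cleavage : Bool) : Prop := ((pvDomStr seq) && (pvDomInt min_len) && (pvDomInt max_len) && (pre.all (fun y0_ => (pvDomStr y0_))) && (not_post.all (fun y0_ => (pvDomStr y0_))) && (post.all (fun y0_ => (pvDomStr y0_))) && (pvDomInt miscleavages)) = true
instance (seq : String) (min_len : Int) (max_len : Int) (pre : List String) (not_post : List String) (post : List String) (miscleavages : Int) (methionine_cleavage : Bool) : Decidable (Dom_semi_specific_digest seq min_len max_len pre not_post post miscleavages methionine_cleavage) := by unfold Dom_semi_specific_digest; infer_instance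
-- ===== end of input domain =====

-- B restructures the digestion as two staged passes: it first computes the full list of cleavage
-- sites, then walks that site list (not the positions) keeping only an integer index into a
-- precomputed array of candidate N-termini, instead of A's single position-by-position pass
-- maintaining a mutable starts list; at sites the accepted N-termini are enumerated as a
-- closed-form window.


-- ===== PORT A =====
-- is_enzymatic(aa1, aa2, pre, not_post, post); aa1/aa2 are one-character strings in Python
def pvIsEnzymatic (aa1 aa2 : Char) (pre not_post post : List String) : Bool :=
  (pre.contains (String.singleton aa1) && !(not_post.contains (String.singleton aa2)))
    || post.contains (String.singleton aa2)

-- one iteration of A's `for i in range(seq_len + 1)` loop; state = (starts, yielded-so-far).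
-- `.getD ' '` / `.headD 0` stand for Python's raising seq[...] / starts[0]: under Pre_ the index
-- is always in range and starts is never empty, so the defaults are never used.
def pvStepA (seq : String) (min_len max_len : Int) (pre not_post post : List String)
    (miscleavages : Int) (mc : Bool) (seq_len : Int)
    (st : List Int × List String) (i : Int) : List Int × List String :=
  let starts := st.1
  let acc := st.2
  let aa1 := (PySem.Str.pyGet? seq (min (seq_len - 1) i)).getD ' '
  let aa2 := (PySem.Str.pyGet? seq (min (seq_len - 1) (i + 1))).getD ' '
  let is_cleavage_site := pvIsEnzymatic aa1 aa2 pre not_post post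
  let is_mcs := i == 0 && mc
  if i == seq_len || is_cleavage_site || is_mcs then
    let start := starts.headD 0
    let acc := (PySem.List.pyRange start (min (i + 1) seq_len) 1).foldl
      (fun acc j =>
        let pep_len := min i (seq_len - 1) - j + 1
        if min_len ≤ pep_len ∧ pep_len ≤ max_len
        then acc ++ [PySem.Str.slice seq (some j) (some (i + 1))] else acc) acc
    let starts := starts ++ [i + 1]
    let mcleaved : Int := if starts.headD 0 == 0 && mc then 1 else 0
    let starts := if (starts.length : Int) > miscleavages + 1 + mcleaved || i == seq_len
      then PySem.List.slice starts (some (1 + mcleaved)) none else starts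
    (starts, acc)
  else
    (starts, starts.foldl (fun acc s =>
      let pep_len := i - s + 1
      if (min_len ≤ pep_len ∧ pep_len ≤ max_len) ∧ ¬ (starts.contains (i + 1) = true)
      then acc ++ [PySem.Str.slice seq (some s) (some (i + 1))] else acc) acc)

def semi_specific_digest (seq : String) (min_len : Int) (max_len : Int) (pre : List String) (not_post : List String) (post : List String) (miscleavages : Int) (methionine_cleavage : Bool) : List String :=
  let seq_len := PySem.Str.len seq
  let mc := methionine_cleavage && ((PySem.Str.pyGet? seq 0).getD ' ' == 'M')
  ((PySem.List.pyRange 0 (seq_len + 1) 1).foldl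
    (pvStepA seq min_len max_len pre not_post post miscleavages mc seq_len) ([0], [])).2

-- ===== PORT B =====
-- Source B's site predicate: `i == L or is_enzymatic(...) or (i == 0 and met)`
def pvCond (seq : String) (pre not_post post : List String) (met : Bool) (L : Int) (i : Int) : Bool :=
  i == L
  || pvIsEnzymatic ((PySem.Str.pyGet? seq (min (L - 1) i)).getD ' ')
      ((PySem.Str.pyGet? seq (min (L - 1) (i + 1))).getD ' ') pre not_post post
  || (i == 0 && met)

-- one iteration of Source B's `for t, s in enumerate(sites)` loop; state = (a, prev, acc)
def pvStepB (seq : String) (min_len max_len : Int) (miscleavages : Int) (met : Bool)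
    (L : Int) (bounds : List Int)
    (st : Int × Int × List String) (ts : Int × Int) : Int × Int × List String :=
  let a := st.1
  let prev := st.2.1
  let acc := st.2.2
  let t := ts.1
  let s := ts.2
  let acc := (PySem.List.pyRange prev s 1).foldl (fun acc i =>
      (PySem.List.slice bounds (some a) (some (t + 1))).foldl (fun acc b =>
        if min_len ≤ i - b + 1 ∧ i - b + 1 ≤ max_len
        then acc ++ [PySem.Str.slice seq (some b) (some (i + 1))] else acc) acc) acc
  let e := min s (L - 1)
  let acc := (PySem.List.pyRange (max ((PySem.List.pyGet? bounds a).getD 0) (e - max_len + 1))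
      (min (min (s + 1) L) (e - min_len + 2)) 1).foldl
      (fun acc j => acc ++ [PySem.Str.slice seq (some j) (some (s + 1))]) acc
  let drop : Int := if a == 0 && met then 2 else 1
  let a := if (t + 1 - a) + 1 > miscleavages + drop || s == L then a + drop else a
  (a, s + 1, acc)

def semi_specific_digest_alt (seq : String) (min_len : Int) (max_len : Int) (pre : List String) (not_post : List String) (post : List String) (miscleavages : Int) (methionine_cleavage : Bool) : List String :=
  let L := PySem.Str.len seq
  let met := methionine_cleavage && ((PySem.Str.pyGet? seq 0).getD ' ' == 'M')
  let sites := (PySem.List.pyRange 0 (L + 1) 1).filter (pvCond seq pre not_post post met L)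
  let bounds := 0 :: sites.map (· + 1)
  ((PySem.List.enumerate sites 0).foldl
    (pvStepB seq min_len max_len miscleavages met L bounds) (0, 0, [])).2.2

-- ===== PRECONDITION & SPEC =====
-- Pre_ excludes exactly the inputs on which Python A raises: the empty sequence (IndexError on
-- seq[-1] or seq[0]), and methionine cleavage of an 'M'-initial sequence with miscleavages < 0,
-- where starts is sliced empty at i = 0 and starts[0] raises IndexError later.
def Pre_semi_specific_digest (seq : String) (min_len : Int) (max_len : Int) (pre : List String) (not_post : List String) (post : List String) (miscleavages : Int) (methionine_cleavage : Bool) : Prop :=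
  seq ≠ "" ∧ ¬ (methionine_cleavage = true ∧ PySem.Str.pyGet? seq 0 = some 'M' ∧ miscleavages < 0)
instance (seq : String) (min_len : Int) (max_len : Int) (pre : List String) (not_post : List String) (post : List String) (miscleavages : Int) (methionine_cleavage : Bool) : Decidable (Pre_semi_specific_digest seq min_len max_len pre not_post post miscleavages methionine_cleavage) := by unfold Pre_semi_specific_digest; infer_instance

def pvWitness_semi_specific_digest : String × Int × Int × List String × List String × List String × Int × Bool :=
  ("MAKR", 1, 3, ["K", "R"], ["P"], [], 1, true)

def Spec_semi_specific_digest (seq : String) (min_len : Int) (max_len : Int) (pre : List String) (not_post : List String) (post : List String) (miscleavages : Int) (methionine_cleavage : Bool) (out : List String) : Prop := out = semi_specific_digest_alt seq min_len max_len pre not_post post miscleavages methionine_cleavage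
instance (seq : String) (min_len : Int) (max_len : Int) (pre : List String) (not_post : List String) (post : List String) (miscleavages : Int) (methionine_cleavage : Bool) (out : List String) : Decidable (Spec_semi_specific_digest seq min_len max_len pre not_post post miscleavages methionine_cleavage out) := by unfold Spec_semi_specific_digest; infer_instance

-- ===== CLAIM (what is proved, stated in full; the proofs are below) =====
def Claim_equal_semi_specific_digest : Prop := ∀ (seq : String) (min_len : Int) (max_len : Int) (pre : List String) (not_post : List String) (post : List String) (miscleavages : Int) (methionine_cleavage : Bool), Dom_semi_specific_digest seq min_len max_len pre not_post post miscleavages methionine_cleavage → Pre_semi_specific_digest seq min_len max_len pre not_post post miscleavages methionine_cleavage → Spec_semi_specific_digest seq min_len max_len pre not_post post miscleavages methionine_cleavage (semi_specific_digest seq min_len max_len pre not_post post miscleavages methionine_cleavage)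

-- ===== LEMMAS AND PROOFS =====
-- filtering a range by a length window equals mapping over the clipped sub-range
theorem pv_window (g : Int → String) (e mn mx : Int) :
    ∀ (n : Nat) (a b : Int), (b - a).toNat ≤ n → ∀ (acc : List String),
    (PySem.List.pyRange a b 1).foldl
      (fun acc j => if mn ≤ e - j + 1 ∧ e - j + 1 ≤ mx then acc ++ [g j] else acc) acc
    = (PySem.List.pyRange (max a (e - mx + 1)) (min b (e - mn + 2)) 1).foldl
      (fun acc j => acc ++ [g j]) acc := by
  intro n
  induction n with
  | zero =>
    intro a b hab acc
    rw [PySem.List.pyRange_one_eq_nil (by omega : b ≤ a),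
      PySem.List.pyRange_one_eq_nil (by omega : min b (e - mn + 2) ≤ max a (e - mx + 1))]
    rfl
  | succ n ih =>
    intro a b hab acc
    by_cases hab' : a < b
    · rw [PySem.List.pyRange_one_cons hab']
      simp only [List.foldl_cons]
      by_cases hin : mn ≤ e - a + 1 ∧ e - a + 1 ≤ mx
      · rw [if_pos hin, (by omega : max a (e - mx + 1) = a),
          PySem.List.pyRange_one_cons (by omega : a < min b (e - mn + 2))]
        simp only [List.foldl_cons]
        have h3 := ih (a + 1) b (by omega) (acc ++ [g a])
        rw [(by omega : max (a + 1) (e - mx + 1) = a + 1)] at h3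
        exact h3
      · rw [if_neg hin]
        by_cases hlo : a + 1 ≤ e - mx + 1
        · rw [(by omega : max a (e - mx + 1) = max (a + 1) (e - mx + 1))]
          exact ih (a + 1) b (by omega) acc
        · rw [PySem.List.pyRange_one_eq_nil
            (by omega : min b (e - mn + 2) ≤ max a (e - mx + 1))]
          have h2 := ih (a + 1) b (by omega) acc
          rw [PySem.List.pyRange_one_eq_nil
            (by omega : min b (e - mn + 2) ≤ max (a + 1) (e - mx + 1))] at h2
          simpa using h2
    · rw [PySem.List.pyRange_one_eq_nil (by omega : b ≤ a),
        PySem.List.pyRange_one_eq_nil (by omega : min b (e - mn + 2) ≤ max a (e - mx + 1))]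
      rfl

-- A's non-enzymatic inner loop with the (always true) membership conjunct dropped
theorem pv_else (g : Int → String) (mn mx i : Int) (starts : List Int)
    (h : ¬ starts.contains (i + 1) = true) (acc : List String) :
    starts.foldl (fun acc s =>
      if (mn ≤ i - s + 1 ∧ i - s + 1 ≤ mx) ∧ ¬ (starts.contains (i + 1) = true)
      then acc ++ [g s] else acc) acc
    = starts.foldl (fun acc b =>
      if mn ≤ i - b + 1 ∧ i - b + 1 ≤ mx then acc ++ [g b] else acc) acc := by
  apply PySem.List.foldl_congr_mem
  intro acc x _
  by_cases hx : mn ≤ i - x + 1 ∧ i - x + 1 ≤ mx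
  · rw [if_pos ⟨hx, h⟩, if_pos hx]
  · rw [if_neg (fun hc => hx hc.1), if_neg hx]


theorem pv_take_ext (l : List Int) (A k : Nat) (hA : A ≤ k) (hk : k < l.length) :
    (l.drop A).take (k + 1 - A) = (l.drop A).take (k - A) ++ [l[k]] := by
  rw [(by omega : k + 1 - A = (k - A) + 1), List.take_succ]
  congr 1
  rw [List.getElem?_drop, (by omega : A + (k - A) = k)]
  simp [hk]

theorem pv_drop_take (l : List Int) (A d m : Nat) :
    ((l.drop A).take m).drop d = (l.drop (A + d)).take (m - d) := by
  rw [List.drop_take, List.drop_drop]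

theorem pv_take_cons (l : List Int) (A m : Nat) (hA : A < l.length) :
    (l.drop A).take (m + 1) = l[A] :: (l.drop (A + 1)).take m := by
  rw [List.drop_eq_getElem_cons hA, List.take_succ_cons]

-- evaluating one iteration of A's loop at a cleavage site / away from one
theorem pv_stepA_site (seq : String) (mn mx : Int) (pre np po : List String) (misc : Int)
    (met : Bool) (L i : Int) (starts : List Int) (acc : List String)
    (hc : pvCond seq pre np po met L i = true) :
    pvStepA seq mn mx pre np po misc met L (starts, acc) i =
      ((if ((starts ++ [i + 1]).length : Int) > misc + 1 +
            (if (starts ++ [i + 1]).headD 0 == 0 && met then 1 else 0) || i == L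
        then PySem.List.slice (starts ++ [i + 1])
          (some (1 + (if (starts ++ [i + 1]).headD 0 == 0 && met then 1 else 0))) none
        else starts ++ [i + 1]),
       (PySem.List.pyRange (max (starts.headD 0) (min i (L - 1) - mx + 1))
          (min (min (i + 1) L) (min i (L - 1) - mn + 2)) 1).foldl
          (fun acc j => acc ++ [PySem.Str.slice seq (some j) (some (i + 1))]) acc) := by
  have hc' : (i == L
      || pvIsEnzymatic ((PySem.Str.pyGet? seq (min (L - 1) i)).getD ' ')
        ((PySem.Str.pyGet? seq (min (L - 1) (i + 1))).getD ' ') pre np po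
      || (i == 0 && met)) = true := hc
  simp only [pvStepA]
  rw [if_pos hc']
  rw [pv_window (fun j => PySem.Str.slice seq (some j) (some (i + 1))) (min i (L - 1)) mn mx
    (min (i + 1) L - starts.headD 0).toNat (starts.headD 0) (min (i + 1) L) (le_refl _) acc]

theorem pv_stepA_nonsite (seq : String) (mn mx : Int) (pre np po : List String) (misc : Int)
    (met : Bool) (L i : Int) (starts : List Int) (acc : List String)
    (hc : ¬ pvCond seq pre np po met L i = true)
    (hmem : (i + 1) ∉ starts) :
    pvStepA seq mn mx pre np po misc met L (starts, acc) i =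
      (starts, starts.foldl (fun acc b =>
        if mn ≤ i - b + 1 ∧ i - b + 1 ≤ mx
        then acc ++ [PySem.Str.slice seq (some b) (some (i + 1))] else acc) acc) := by
  have hc' : ¬ ((i == L
      || pvIsEnzymatic ((PySem.Str.pyGet? seq (min (L - 1) i)).getD ' ')
        ((PySem.Str.pyGet? seq (min (L - 1) (i + 1))).getD ' ') pre np po
      || (i == 0 && met)) = true) := hc
  simp only [pvStepA]
  rw [if_neg hc']
  rw [pv_else (fun s => PySem.Str.slice seq (some s) (some (i + 1))) mn mx i starts
    (by simpa using hmem) acc]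

theorem pv_enum_drop {α : Type} (l : List α) (k : Nat) (h : k < l.length) :
    (PySem.List.enumerate l 0).drop k
      = ((k : Int), l[k]) :: (PySem.List.enumerate l 0).drop (k + 1) := by
  have hk : k < (PySem.List.enumerate l 0).length := by
    simpa [PySem.List.length_enumerate] using h
  rw [List.drop_eq_getElem_cons hk]
  congr 1
  rw [PySem.List.getElem_enumerate]
  simp

-- evaluating one iteration of B's loop at a site s = prev = p
theorem pv_stepB_site (seq : String) (mn mx misc : Int) (met : Bool) (L : Int)
    (bounds : List Int) (A tN : Nat) (p : Int) (acc : List String)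
    (hAb : A < bounds.length) :
    pvStepB seq mn mx misc met L bounds ((A : Int), p, acc) ((tN : Int), p)
      = ((if (((tN : Int) + 1 - (A : Int)) + 1 > misc + (if ((A : Int) == 0) && met then (2 : Int) else 1) || p == L) = true
          then (A : Int) + (if ((A : Int) == 0) && met then (2 : Int) else 1) else (A : Int)),
         p + 1,
         (PySem.List.pyRange (max bounds[A] (min p (L - 1) - mx + 1))
            (min (min (p + 1) L) (min p (L - 1) - mn + 2)) 1).foldl
            (fun acc j => acc ++ [PySem.Str.slice seq (some j) (some (p + 1))]) acc) := by
  simp only [pvStepB]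
  rw [PySem.List.pyRange_one_eq_nil (le_refl p), PySem.List.pyGet?_natCast,
    List.getElem?_eq_getElem hAb]
  simp only [List.foldl_nil, Option.getD_some]

-- advancing B's prev pointer by one non-site position
theorem pv_stepB_advance (seq : String) (mn mx misc : Int) (met : Bool) (L : Int)
    (bounds : List Int) (a p s t : Int) (acc : List String) (hps : p < s) :
    pvStepB seq mn mx misc met L bounds (a, p, acc) (t, s)
      = pvStepB seq mn mx misc met L bounds (a, p + 1,
          (PySem.List.slice bounds (some a) (some (t + 1))).foldl (fun acc b =>
            if mn ≤ p - b + 1 ∧ p - b + 1 ≤ mx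
            then acc ++ [PySem.Str.slice seq (some b) (some (p + 1))] else acc) acc) (t, s) := by
  simp only [pvStepB]
  rw [PySem.List.pyRange_one_cons hps]
  simp only [List.foldl_cons]

-- the main invariant: A's remaining position-loop equals B's remaining site-loop
theorem pv_main (seq : String) (mn mx : Int) (pre np po : List String) (misc : Int)
    (met : Bool) (L : Int) (hL : 0 ≤ L) (hmet : met = true → 0 ≤ misc) :
    ∀ (n : Nat) (p : Int) (tN A : Nat) (acc : List String),
    (L + 1 - p).toNat = n → 0 ≤ p → p ≤ L + 1 →
    (PySem.List.pyRange p (L + 1) 1).filter (pvCond seq pre np po met L)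
      = ((PySem.List.pyRange 0 (L + 1) 1).filter (pvCond seq pre np po met L)).drop tN →
    (p ≤ L → A ≤ tN) →
    (∀ x ∈ (0 :: ((PySem.List.pyRange 0 (L + 1) 1).filter (pvCond seq pre np po met L)).map (· + 1)).take (tN + 1), x ≤ p) →
    ((PySem.List.pyRange p (L + 1) 1).foldl
        (pvStepA seq mn mx pre np po misc met L)
        ((((0 :: ((PySem.List.pyRange 0 (L + 1) 1).filter (pvCond seq pre np po met L)).map (· + 1)).drop A).take (tN + 1 - A)), acc)).2
      = (((PySem.List.enumerate ((PySem.List.pyRange 0 (L + 1) 1).filter (pvCond seq pre np po met L)) 0).drop tN).foldl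
          (pvStepB seq mn mx misc met L (0 :: ((PySem.List.pyRange 0 (L + 1) 1).filter (pvCond seq pre np po met L)).map (· + 1)))
          ((A : Int), p, acc)).2.2 := by
  intro n
  induction n with
  | zero =>
    intro p tN A acc hn hp0 hpL hfil ha hle
    have hp : L + 1 ≤ p := by omega
    rw [PySem.List.pyRange_one_eq_nil hp] at hfil ⊢
    simp only [List.filter_nil] at hfil
    have h2 := congrArg List.length hfil
    simp only [List.length_nil, List.length_drop] at h2
    have hdnil : (PySem.List.enumerate ((PySem.List.pyRange 0 (L + 1) 1).filter (pvCond seq pre np po met L)) 0).drop tN = [] :=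
      List.drop_eq_nil_of_le (by simp only [PySem.List.length_enumerate]; omega)
    rw [hdnil]
    simp
  | succ n ih =>
    intro p tN A acc hn hp0 hpL hfil ha hle
    have hpL' : p ≤ L := by omega
    have hcons : PySem.List.pyRange p (L + 1) 1 = p :: PySem.List.pyRange (p + 1) (L + 1) 1 :=
      PySem.List.pyRange_one_cons (by omega)
    set cond := pvCond seq pre np po met L with hcond_def
    set sites := (PySem.List.pyRange 0 (L + 1) 1).filter cond with hsites_def
    set bounds := 0 :: sites.map (· + 1) with hbounds_def
    have hblen : bounds.length = sites.length + 1 := by simp [hbounds_def]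
    have hsge : ∀ x ∈ sites, 0 ≤ x := by
      intro x hx
      have h1 := (List.mem_filter.mp hx).1
      exact (PySem.List.mem_pyRange_one.mp h1).1
    have hcondL : cond L = true := by simp [hcond_def, pvCond]
    by_cases hc : cond p = true
    · -- ===== site case: p is a cleavage position =====
      have hfil2 : p :: (PySem.List.pyRange (p + 1) (L + 1) 1).filter cond = sites.drop tN := by
        rw [← hfil, hcons, List.filter_cons_of_pos hc]
      have htlt : tN < sites.length := by
        by_contra hcon
        rw [List.drop_eq_nil_of_le (by omega)] at hfil2
        exact absurd hfil2 (by simp)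
      have hA : A ≤ tN := ha hpL'
      have hsget : sites[tN]'htlt = p := by
        have h0 := congrArg (fun l => l[0]?) hfil2
        simp only [List.getElem?_cons_zero, List.getElem?_drop, Nat.add_zero,
          List.getElem?_eq_getElem htlt] at h0
        exact (Option.some_inj.mp h0.symm)
      have htail : (PySem.List.pyRange (p + 1) (L + 1) 1).filter cond = sites.drop (tN + 1) := by
        have h1 := congrArg List.tail hfil2
        simpa [List.tail_drop] using h1
      have hAb : A < bounds.length := by omega
      have ht1b : tN + 1 < bounds.length := by omega
      have hb1 : bounds[tN + 1]'ht1b = p + 1 := by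
        simp only [hbounds_def, List.getElem_cons_succ, List.getElem_map]
        rw [hsget]
      -- the window and its head
      have hW : (bounds.drop A).take (tN + 1 - A)
          = bounds[A] :: (bounds.drop (A + 1)).take (tN - A) := by
        rw [(by omega : tN + 1 - A = (tN - A) + 1)]
        exact pv_take_cons bounds A (tN - A) hAb
      have hb0 : (bounds[A] == (0 : Int)) = (A == 0) := by
        cases A with
        | zero => simp [hbounds_def]
        | succ k =>
          have hk : k < sites.length := by omega
          have hbk : bounds[k + 1]'(by omega) = sites[k] + 1 := by
            simp [hbounds_def]
          rw [hbk]
          have hge := hsge sites[k] (List.getElem_mem hk)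
          have h1 : (sites[k] + 1 == (0 : Int)) = false := by
            simp only [beq_eq_false_iff_ne, ne_eq]
            omega
          simp [h1]
      -- extend window by the new boundary p + 1
      have hext : (bounds.drop A).take (tN + 1 - A) ++ [p + 1]
          = (bounds.drop A).take (tN + 1 + 1 - A) := by
        rw [(by omega : tN + 1 + 1 - A = (tN + 1) + 1 - A),
          pv_take_ext bounds A (tN + 1) (by omega) ht1b, hb1]
      -- evaluate the A step
      rw [hcons, List.foldl_cons, pv_stepA_site seq mn mx pre np po misc met L p _ acc hc]
      -- evaluate the B step
      rw [pv_enum_drop sites tN htlt, List.foldl_cons, hsget]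
      rw [pv_stepB_site seq mn mx misc met L bounds A tN p acc hAb]
      -- align the two bookkeeping computations
      have hhead : ((List.take (tN + 1 - A) (List.drop A bounds) ++ [p + 1]).headD 0) = bounds[A] := by
        rw [hW]; rfl
      have hWhead : (List.take (tN + 1 - A) (List.drop A bounds)).headD 0 = bounds[A] := by
        rw [hW]; rfl
      have hWlen : (List.take (tN + 1 - A) (List.drop A bounds)).length = tN + 1 - A := by
        rw [List.length_take, List.length_drop]; omega
      have hcast : ((A : Int) == 0) = (A == 0) := by
        rcases Nat.eq_zero_or_pos A with h | h
        · subst h; rfl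
        · have h1 : ((A : Int) == 0) = false := by simp only [beq_eq_false_iff_ne, ne_eq]; omega
          have h2 : (A == 0) = false := by simp only [beq_eq_false_iff_ne, ne_eq]; omega
          rw [h1, h2]
      rw [hhead, hWhead, hb0, hcast]
      have hlen2 : (List.take (tN + 1 - A) (List.drop A bounds) ++ [p + 1]).length = (tN + 1 - A) + 1 := by
        simp [hWlen]
      rw [hlen2]
      have hbooleq : (decide ((((tN + 1 - A) + 1 : Nat) : Int) > misc + 1 + (if ((A == 0) && met) = true then (1 : Int) else 0)) || p == L)
          = (decide (((tN : Int) + 1 - (A : Int)) + 1 > misc + (if ((A == 0) && met) = true then (2 : Int) else 1)) || p == L) := by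
        congr 1
        rw [decide_eq_decide]
        have hcast2 : (((tN + 1 - A) + 1 : Nat) : Int) = (tN : Int) + 2 - A := by omega
        rw [hcast2]
        by_cases hbb : ((A == 0) && met) = true
        · rw [if_pos hbb, if_pos hbb]; constructor <;> intro <;> omega
        · rw [if_neg hbb, if_neg hbb]; constructor <;> intro <;> omega
      rw [hbooleq]
      have hle' : ∀ x ∈ List.take (tN + 1 + 1) bounds, x ≤ p + 1 := by
        intro x hx
        rw [List.take_succ, List.getElem?_eq_getElem ht1b] at hx
        simp only [Option.toList_some] at hx
        rcases List.mem_append.mp hx with h | h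
        · exact le_trans (hle x h) (by omega)
        · simp only [List.mem_singleton] at h
          rw [h, hb1]
      by_cases htrig : (decide (((tN : Int) + 1 - (A : Int)) + 1 > misc + (if ((A == 0) && met) = true then (2 : Int) else 1)) || p == L) = true
      · simp only [if_pos htrig]
        set D : Nat := if ((A == 0) && met) = true then 2 else 1 with hD
        have hslice : PySem.List.slice (List.take (tN + 1 - A) (List.drop A bounds) ++ [p + 1])
            (some (1 + (if ((A == 0) && met) = true then (1 : Int) else 0))) none
            = (List.take (tN + 1 - A) (List.drop A bounds) ++ [p + 1]).drop D := by
          by_cases hbb : ((A == 0) && met) = true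
          · rw [if_pos hbb, PySem.List.slice_from (xs := List.take (tN + 1 - A) (List.drop A bounds) ++ [p + 1]) (a := 1 + 1) (by norm_num)]
            norm_num [hD, hbb]
            omega
          · rw [if_neg hbb, PySem.List.slice_from (xs := List.take (tN + 1 - A) (List.drop A bounds) ++ [p + 1]) (a := 1 + 0) (by norm_num)]
            norm_num [hD, hbb]
        rw [hslice, hext, pv_drop_take, Nat.sub_sub]
        have haD : (A : Int) + (if ((A == 0) && met) = true then (2 : Int) else 1) = ((A + D : Nat) : Int) := by
          by_cases hbb : ((A == 0) && met) = true
          · simp only [if_pos hbb, hD]; push_cast; ring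
          · simp only [if_neg hbb, hD]; push_cast; ring
        rw [haD]
        have ha' : p + 1 ≤ L → A + D ≤ tN + 1 := by
          intro hple
          by_cases hbb : ((A == 0) && met) = true
          · have hbb' : A = 0 ∧ met = true := by simpa using hbb
            have hA0 := hbb'.1
            have hm0 := hmet hbb'.2
            have hDv : D = 2 := by simp [hD, hbb]
            have htrig' : ((tN : Int) + 1 - (A : Int)) + 1 > misc + 2 ∨ p = L := by
              have h2 := htrig
              rw [if_pos hbb] at h2
              simpa using h2
            rcases htrig' with h2 | h2
            · omega
            · omega
          · have hDv : D = 1 := by simp [hD, hbb]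
            omega
        exact ih (p + 1) (tN + 1) (A + D) _ (by omega) (by omega) (by omega) htail ha' hle'
      · simp only [if_neg htrig]
        rw [hext]
        exact ih (p + 1) (tN + 1) A _ (by omega) (by omega) (by omega) htail (fun _ => by omega) hle'
    · -- ===== non-site case: p is not a cleavage position =====
      have hfil2 : (PySem.List.pyRange (p + 1) (L + 1) 1).filter cond = List.drop tN sites := by
        rw [← hfil, hcons, List.filter_cons_of_neg (by simpa using hc)]
      have hpneL : p ≠ L := fun h => hc (h ▸ hcondL)
      have hne : List.drop tN sites ≠ [] := by
        rw [← hfil2]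
        intro hnil
        have hLmem : L ∈ (PySem.List.pyRange (p + 1) (L + 1) 1).filter cond :=
          List.mem_filter.mpr ⟨PySem.List.mem_pyRange_one.mpr ⟨by omega, by omega⟩, hcondL⟩
        rw [hnil] at hLmem
        exact absurd hLmem (List.not_mem_nil)
      have htlt : tN < sites.length := by
        by_contra hcon
        exact hne (List.drop_eq_nil_of_le (by omega))
      have hA : A ≤ tN := ha hpL'
      have h0 : (List.drop tN sites)[0]? = some (sites[tN]'htlt) := by
        rw [List.getElem?_drop]
        simp [List.getElem?_eq_getElem htlt]
      have hmemhead : sites[tN]'htlt ∈ (PySem.List.pyRange p (L + 1) 1).filter cond := by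
        apply List.mem_of_getElem? (i := 0)
        rw [hfil]
        exact h0
      have hps : p < sites[tN]'htlt := by
        have hmf := List.mem_filter.mp hmemhead
        have hrange := PySem.List.mem_pyRange_one.mp hmf.1
        have hne2 : p ≠ sites[tN]'htlt := fun h => hc (by rw [h]; exact hmf.2)
        omega
      have hmem : (p + 1) ∉ List.take (tN + 1 - A) (List.drop A bounds) := by
        intro hx
        have heq : List.drop A (List.take (tN + 1) bounds) = List.take (tN + 1 - A) (List.drop A bounds) := by
          rw [List.drop_take]
        rw [← heq] at hx
        have := hle _ (List.mem_of_mem_drop hx)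
        omega
      rw [hcons, List.foldl_cons, pv_stepA_nonsite seq mn mx pre np po misc met L p _ acc hc hmem]
      rw [pv_enum_drop sites tN htlt, List.foldl_cons,
        pv_stepB_advance seq mn mx misc met L bounds (A : Int) p (sites[tN]'htlt) (tN : Int) acc hps]
      have hsl : PySem.List.slice bounds (some (A : Int)) (some ((tN : Int) + 1)) = List.take (tN + 1 - A) (List.drop A bounds) := by
        rw [(by push_cast; ring : ((tN : Int) + 1) = ((tN + 1 : Nat) : Int)), PySem.List.slice_natCast]
      rw [hsl]
      rw [← List.foldl_cons, ← pv_enum_drop sites tN htlt]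
      exact ih (p + 1) tN A _ (by omega) (by omega) (by omega) hfil2 (fun _ => hA)
        (fun x hx => le_trans (hle x hx) (by omega))

-- ===== VERDICT (by name: the statement is the Claim_ definition above) =====
theorem semi_specific_digest_spec : Claim_equal_semi_specific_digest := by
  intro seq mn mx pre np po misc mcb _ hpre
  unfold Spec_semi_specific_digest
  have hL0 : 0 ≤ PySem.Str.len seq := by
    rw [PySem.Str.len_eq]
    exact Int.natCast_nonneg _
  have hmet : (mcb && ((PySem.Str.pyGet? seq 0).getD ' ' == 'M')) = true → 0 ≤ misc := by
    intro hm
    have hm' : mcb = true ∧ ((PySem.Str.pyGet? seq 0).getD ' ' == 'M') = true := by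
      simpa using hm
    cases hget : PySem.Str.pyGet? seq 0 with
    | none =>
      rw [hget] at hm'
      simp at hm'
    | some c =>
      have hc : c = 'M' := by
        have := hm'.2
        rw [hget] at this
        simpa using this
      by_contra hneg
      exact hpre.2 ⟨hm'.1, by rw [hget, hc], by omega⟩
  have hmain := pv_main seq mn mx pre np po misc
    (mcb && ((PySem.Str.pyGet? seq 0).getD ' ' == 'M')) (PySem.Str.len seq) hL0 hmet
    (PySem.Str.len seq + 1).toNat 0 0 0 [] rfl (le_refl 0) (by omega)
    (by rw [List.drop_zero]) (fun _ => le_refl 0)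
    (by
      intro x hx
      simp only [List.take_succ_cons, List.take_zero, List.mem_singleton] at hx
      omega)
  simp only [Nat.zero_add, Nat.sub_zero, List.drop_zero, Nat.cast_zero] at hmain
  simp only [semi_specific_digest, semi_specific_digest_alt]
  convert hmain using 3
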